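-- pv_equiv track=rewrite | github.com/needsomesl33p/2023-advent-of-code | 07day/main.py | get_strength
-- ===== SOURCE A (Python) =====
-- POINTS = {2: 1, 3: 3, 4: 5, 5: 6}
--
-- def get_strength(hand: str, value=0) -> int:
--     card1 = hand[0]
--     num_of_cards = hand.count(card1)
--     value += POINTS[num_of_cards] if num_of_cards in POINTS else 0
--     hand = hand.replace(card1, '')
--     if len(hand) <= 1:
--         return value
--     return get_strength(hand, value)
-- ===== SOURCE B (Python) =====
-- POINTS = {2: 1, 3: 3, 4: 5, 5: 6}
--
--
-- def get_strength(hand: str, value=0) -> int: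
--     counts = {}
--     for card in hand:
--         counts[card] = counts.get(card, 0) + 1
--     return value + sum(POINTS.get(n, 0) for n in counts.values())
-- ===== Notes on version B (the rewrite author's own statement) =====
-- stated objective: idiomatic
-- what changed: replaces A's recursion that repeatedly rescans and rebuilds the string with .count/.replace by a single-pass frequency tally followed by one sum over the counts
-- crash fix: On the empty string A raises IndexError at hand[0]; B returns value unchanged. — e.g. on get_strength("", 7): A raises IndexError, B returns 7
import Mathlib
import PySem

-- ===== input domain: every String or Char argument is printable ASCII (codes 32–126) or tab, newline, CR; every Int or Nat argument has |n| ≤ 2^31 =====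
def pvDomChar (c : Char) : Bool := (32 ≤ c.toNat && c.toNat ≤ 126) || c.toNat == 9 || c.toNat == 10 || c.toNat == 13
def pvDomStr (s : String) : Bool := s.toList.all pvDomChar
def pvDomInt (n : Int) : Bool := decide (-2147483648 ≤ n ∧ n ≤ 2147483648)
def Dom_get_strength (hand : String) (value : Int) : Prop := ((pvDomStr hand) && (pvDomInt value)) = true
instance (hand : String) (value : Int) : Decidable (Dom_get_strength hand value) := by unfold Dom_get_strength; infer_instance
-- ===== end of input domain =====

-- B replaces A's recursion (rescan with .count, rebuild with .replace) by a one-pass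
-- frequency tally and a single sum over the counts; same return value wherever A returns.

-- POINTS = {2: 1, 3: 3, 4: 5, 5: 6}
def pvPOINTS : PySem.Dict Int Int := PySem.Dict.mk [(2, 1), (3, 3), (4, 5), (5, 6)]

-- ===== PORT A =====
-- The recursion of A over the hand's characters. Exactness of the hand-ported pieces:
-- hand.count(card1) with a ONE-CHARACTER needle is List.count, and
-- hand.replace(card1, '') with a ONE-CHARACTER pattern deletes every occurrence,
-- i.e. it is List.filter (· != card1); both are exact for single-character arguments.
def getStrengthGo : List Char → Int → Int
  | [], value => value   -- unreachable under Pre_: Python raises IndexError at hand[0]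
  | card1 :: rest, value =>
      let numOfCards : Int := ((card1 :: rest).count card1 : Int)
      let value := value + (if pvPOINTS.contains numOfCards then pvPOINTS.getD numOfCards 0 else 0)
      let hand := (card1 :: rest).filter (fun x => x != card1)
      if hand.length ≤ 1 then value else getStrengthGo hand value
termination_by l _ => l.length
decreasing_by
  simp only [List.filter_cons, bne_self_eq_false, Bool.false_eq_true, if_false, List.length_cons]
  exact Nat.lt_succ_of_le (List.length_filter_le _ _)

def get_strength (hand : String) (value : Int) : Int :=
  getStrengthGo hand.toList value

-- ===== PORT B =====
def get_strength_alt (hand : String) (value : Int) : Int :=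
  let counts := hand.toList.foldl (fun d card => d.insert card (d.getD card 0 + 1)) PySem.Dict.empty
  value + (counts.values.map (fun n => (pvPOINTS.get? n).getD 0)).sum

-- ===== PRECONDITION & SPEC =====
-- Pre_ excludes exactly the empty string, on which A raises IndexError at hand[0].
def Pre_get_strength (hand : String) (value : Int) : Prop := hand.toList ≠ []
instance (hand : String) (value : Int) : Decidable (Pre_get_strength hand value) := by
  unfold Pre_get_strength; infer_instance

def pvWitness_get_strength : String × Int := ("AABBB", 0)

-- On the empty string A raises IndexError at hand[0]; B returns value unchanged.
def Raises_get_strength (hand : String) (value : Int) : Prop := hand.toList = []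
instance (hand : String) (value : Int) : Decidable (Raises_get_strength hand value) := by
  unfold Raises_get_strength; infer_instance
def pvRaiseWitness_get_strength : String × Int := ("", 7)
def pvRaiseWitnessOut_get_strength : Int := 7

def Spec_get_strength (hand : String) (value : Int) (out : Int) : Prop := out = get_strength_alt hand value
instance (hand : String) (value : Int) (out : Int) : Decidable (Spec_get_strength hand value out) := by unfold Spec_get_strength; infer_instance

-- ===== CLAIM (what is proved, stated in full; the proofs are below) =====
def Claim_equal_get_strength : Prop := ∀ (hand : String) (value : Int), Dom_get_strength hand value → Pre_get_strength hand value → Spec_get_strength hand value (get_strength hand value)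

def Claim_raises_get_strength : Prop := (∀ (hand : String) (value : Int), Dom_get_strength hand value → Raises_get_strength hand value → ¬ Pre_get_strength hand value) ∧ (Dom_get_strength (pvRaiseWitness_get_strength.1) (pvRaiseWitness_get_strength.2) ∧ Raises_get_strength (pvRaiseWitness_get_strength.1) (pvRaiseWitness_get_strength.2) ∧ get_strength_alt (pvRaiseWitness_get_strength.1) (pvRaiseWitness_get_strength.2) = pvRaiseWitnessOut_get_strength)

-- ===== LEMMAS AND PROOFS =====

-- the common value: points for one group, and the total score of a hand
def pvPts (n : Int) : Int := (pvPOINTS.get? n).getD 0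
def pvScore (l : List Char) : Int :=
  ((PySem.List.dedup l).map (fun k => pvPts (l.count k : Int))).sum

lemma pvPts_ifContains (n : Int) :
    (if pvPOINTS.contains n then pvPOINTS.getD n 0 else 0) = pvPts n := by
  by_cases h : pvPOINTS.contains n = true
  · simp [h, pvPts, PySem.Dict.getD]
  · have h' : pvPOINTS.get? n = none :=
      (PySem.Dict.get?_eq_none_iff_contains _ _).mpr (by simpa using h)
    simp [h, pvPts, h']

lemma pvScore_small (l : List Char) (h : l.length ≤ 1) : pvScore l = 0 := by
  match l, h with
  | [], _ => simp [pvScore, PySem.List.dedup_eq_ofList, PySem.Set.ofList]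
  | [d], _ =>
      simp [pvScore, PySem.List.dedup_eq_ofList, PySem.Set.ofList, PySem.Set.add, pvPts,
        pvPOINTS, PySem.Dict.get?]

lemma pvDedup_perm (c : Char) (cs : List Char) :
    (PySem.List.dedup (c :: cs)).Perm
      (c :: PySem.List.dedup ((c :: cs).filter (fun x => x != c))) := by
  have hfil : (c :: cs).filter (fun x => x != c) = cs.filter (fun x => x != c) := by
    simp [List.filter_cons]
  rw [hfil, PySem.List.dedup_eq_ofList, PySem.List.dedup_eq_ofList]
  have hnd1 := PySem.Set.nodup_ofList (c :: cs)
  have hnd2 : (c :: PySem.Set.ofList (cs.filter (fun x => x != c))).Nodup := by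
    refine List.nodup_cons.mpr ⟨?_, PySem.Set.nodup_ofList _⟩
    intro hc
    have := (PySem.Set.mem_ofList _ _).mp hc
    simp [List.mem_filter] at this
  refine (List.perm_ext_iff_of_nodup hnd1 hnd2).mpr (fun a => ?_)
  simp only [PySem.Set.mem_ofList, List.mem_cons, List.mem_filter]
  by_cases ha : a = c
  · simp [ha]
  · simp [ha, bne_iff_ne]

lemma pvScore_step (c : Char) (cs : List Char) :
    pvScore (c :: cs) =
      pvPts ((c :: cs).count c : Int) + pvScore ((c :: cs).filter (fun x => x != c)) := by
  unfold pvScore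
  have hperm := (pvDedup_perm c cs).map (fun k => pvPts ((c :: cs).count k : Int))
  rw [hperm.sum_eq]
  simp only [List.map_cons, List.sum_cons]
  have hmap : (PySem.List.dedup ((c :: cs).filter (fun x => x != c))).map
        (fun k => pvPts ((c :: cs).count k : Int)) =
      (PySem.List.dedup ((c :: cs).filter (fun x => x != c))).map
        (fun k => pvPts (((c :: cs).filter (fun x => x != c)).count k : Int)) := by
    refine List.map_congr_left fun k hk => ?_
    have hk' : k ∈ (c :: cs).filter (fun x => x != c) := by
      rw [PySem.List.dedup_eq_ofList] at hk
      exact (PySem.Set.mem_ofList _ _).mp hk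
    have hne : (k != c) = true := (List.mem_filter.mp hk').2
    have hcnt : ((c :: cs).filter (fun x => x != c)).count k = (c :: cs).count k :=
      List.count_filter hne
    rw [hcnt]
  rw [hmap]

lemma getStrengthGo_eq (n : Nat) :
    ∀ l : List Char, l.length ≤ n → l ≠ [] →
      ∀ v : Int, getStrengthGo l v = v + pvScore l := by
  induction n with
  | zero =>
      intro l hl hne
      cases l with
      | nil => exact absurd rfl hne
      | cons c cs => simp at hl
  | succ n ih =>
      intro l hl hne v
      match l, hne with
      | c :: cs, _ =>
        rw [getStrengthGo]
        simp only [pvPts_ifContains]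
        set l' := (c :: cs).filter (fun x => x != c) with hl'
        have hstep := pvScore_step c cs
        by_cases hsmall : l'.length ≤ 1
        · rw [if_pos hsmall, hstep, pvScore_small l' hsmall]
          ring
        · rw [if_neg hsmall]
          have hlt : l'.length < (c :: cs).length := by
            have : l' = cs.filter (fun x => x != c) := by
              simp [hl', List.filter_cons]
            rw [this]
            exact Nat.lt_succ_of_le (List.length_filter_le _ _)
          have hle : l'.length ≤ n := by
            have := Nat.lt_of_lt_of_le hlt hl
            omega
          have hne' : l' ≠ [] := by
            intro h0
            rw [h0] at hsmall
            simp at hsmall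
          rw [ih l' hle hne' (v + pvPts ((c :: cs).count c : Int))]
          rw [hstep]
          ring

lemma get_strength_alt_eq (hand : String) (value : Int) :
    get_strength_alt hand value = value + pvScore hand.toList := by
  unfold get_strength_alt pvScore
  rw [PySem.Dict.foldl_insert_getD_add_one_eq_counter]
  simp only [PySem.Dict.values, PySem.Dict.items_counter, List.map_map,
    PySem.List.dedup_eq_ofList, pvPts]
  rfl

-- ===== VERDICT (by name: the statement is the Claim_ definition above) =====
theorem get_strength_spec : Claim_equal_get_strength := by
  intro hand value _ hpre
  unfold Spec_get_strength
  rw [get_strength_alt_eq]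
  unfold get_strength
  exact getStrengthGo_eq hand.toList.length hand.toList le_rfl hpre value

theorem get_strength_raises : Claim_raises_get_strength := by
  unfold Claim_raises_get_strength
  exact ⟨fun hand value _ hr hp => hp hr, by decide⟩

-- self-check: the raise witness satisfies Raises_ and B's port returns the stated value there
theorem pvRaiseWitness_ok :
    Raises_get_strength pvRaiseWitness_get_strength.1 pvRaiseWitness_get_strength.2 ∧
      get_strength_alt pvRaiseWitness_get_strength.1 pvRaiseWitness_get_strength.2 =
        pvRaiseWitnessOut_get_strength :=
  ⟨get_strength_raises.2.2.1, get_strength_raises.2.2.2⟩
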